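-- pv_equiv track=rewrite | github.com/hansmach1ne/LFImap | lfimap/src/utils/parseurl.py | parseFormDataLine
-- ===== SOURCE A (Python) =====
-- def parseFormDataLine(postData):
--     """
--     Parse FormData and return a list of testable parameters
--     Returns list.
--     """
--     if postData == "":
--         return ""
--
--     parameters = postData.split("&")
--     num_parameters = len(parameters)
--     testParams = []
--
--     for i in range(num_parameters):
--         temp_params = []
--
--         for idx, parameter in enumerate(parameters):
--             name_value_pair = parameter.split("=")
--             name = name_value_pair[0]
--             value = (
--                 "PWN"
--                 if idx == i
--                 else (name_value_pair[1] if len(name_value_pair) > 1 else "")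
--             )
--
--             prepareString = f"{name}={value}"
--             temp_params.append(prepareString)
--
--         testParams.append("&".join(temp_params))
--
--     return testParams
-- ===== SOURCE B (Python) =====
-- def parseFormDataLine(postData):
--     """
--     Parse FormData and return a list of testable parameters
--     Returns list.
--     """
--     if postData == "":
--         return ""
--
--     def go(params):
--         # returns (base, variants) for the non-empty suffix `params`:
--         #   base     = the suffix reconstructed with its own values,
--         #   variants = one string per position, that position's value set to PWN
--         nv = params[0].split("=")
--         name = nv[0]
--         value = nv[1] if len(nv) > 1 else ""
--         this = f"{name}={value}"
--         pwn = f"{name}=PWN"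
--         if len(params) == 1:
--             return this, [pwn]
--         rest_base, rest_vars = go(params[1:])
--         return (
--             f"{this}&{rest_base}",
--             [f"{pwn}&{rest_base}"] + [f"{this}&{v}" for v in rest_vars],
--         )
--
--     return go(postData.split("&"))[1]
-- ===== Notes on version B (the rewrite author's own statement) =====
-- stated objective: alternative
-- what changed: B replaces A's nested index loops (for each i, re-split and rebuild every parameter) by a single recursive back-to-front pass over the parameter list that carries the pair (reconstructed suffix, variants of the suffix) and prepends each parameter once.
-- outside the precondition, e.g. on parseFormDataLine(''): A returns '', B returns ''
import Mathlib
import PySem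

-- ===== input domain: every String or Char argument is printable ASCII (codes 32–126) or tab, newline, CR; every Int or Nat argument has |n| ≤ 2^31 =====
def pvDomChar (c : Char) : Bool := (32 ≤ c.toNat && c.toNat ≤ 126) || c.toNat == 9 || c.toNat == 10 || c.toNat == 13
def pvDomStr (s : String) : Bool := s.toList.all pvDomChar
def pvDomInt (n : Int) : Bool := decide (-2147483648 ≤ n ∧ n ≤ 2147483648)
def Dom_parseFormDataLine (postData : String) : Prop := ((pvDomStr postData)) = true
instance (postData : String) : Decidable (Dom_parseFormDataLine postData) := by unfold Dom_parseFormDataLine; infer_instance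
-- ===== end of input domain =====

-- B replaces A's nested index loops by ONE recursive back-to-front pass that carries
-- (reconstructed suffix, variants of the suffix) as an accumulator pair (objective: alternative).

-- shared primitive wrapper: s.split(sep) for a non-empty literal separator (split? is none only for sep = "")
def pvSplit (s sep : String) : List String := (PySem.Str.split? s sep).getD []

-- ===== PORT A =====
def parseFormDataLine (postData : String) : List String :=
  -- Python returns the STRING "" here (not a list); Pre_ excludes this input
  if postData == "" then []
  else
    let parameters := pvSplit postData "&"
    let numParameters := PySem.List.len parameters
    (PySem.List.pyRange 0 numParameters 1).foldl
      (fun testParams i =>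
        let tempParams := (PySem.List.enumerate parameters).foldl
          (fun tp q =>
            let nv := pvSplit q.2 "="
            let name := PySem.List.pyGetD nv 0 ""
            let value := if q.1 == i then "PWN"
              else if PySem.List.len nv > 1 then PySem.List.pyGetD nv 1 "" else ""
            tp ++ [name ++ "=" ++ value]) []
        testParams ++ [PySem.Str.join "&" tempParams]) []

-- ===== PORT B =====
-- Source B's recursive helper go: for a non-empty suffix, return
-- (the suffix reconstructed with its own values, the list of one-PWN variants of the suffix)
def pvGo : List String → String × List String
  | [] => ("", [])          -- unreachable: Source B only calls go on non-empty lists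
  | p :: rest =>
    let nv := pvSplit p "="
    let name := PySem.List.pyGetD nv 0 ""
    let value := if PySem.List.len nv > 1 then PySem.List.pyGetD nv 1 "" else ""
    let this := name ++ "=" ++ value
    let pwn := name ++ "=PWN"
    match rest with
    | [] => (this, [pwn])
    | _ :: _ =>
      let r := pvGo rest
      (this ++ "&" ++ r.1, (pwn ++ "&" ++ r.1) :: r.2.map (fun v => this ++ "&" ++ v))

def parseFormDataLine_alt (postData : String) : List String :=
  -- same guard as Source B (Python returns the STRING "" here; Pre_ excludes it)
  if postData == "" then []
  else (pvGo (pvSplit postData "&")).2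

-- ===== PRECONDITION & SPEC =====
-- Pre_ excludes only the empty string, on which A returns the Python string "" (not a list of strings).
def Pre_parseFormDataLine (postData : String) : Prop := postData ≠ ""
instance (postData : String) : Decidable (Pre_parseFormDataLine postData) := by
  unfold Pre_parseFormDataLine; infer_instance
def pvWitness_parseFormDataLine : String := "a=1&b=2"

def Spec_parseFormDataLine (postData : String) (out : List String) : Prop := out = parseFormDataLine_alt postData
instance (postData : String) (out : List String) : Decidable (Spec_parseFormDataLine postData out) := by unfold Spec_parseFormDataLine; infer_instance

-- ===== CLAIM (what is proved, stated in full; the proofs are below) =====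
def Claim_equal_parseFormDataLine : Prop := ∀ (postData : String), Dom_parseFormDataLine postData → Pre_parseFormDataLine postData → Spec_parseFormDataLine postData (parseFormDataLine postData)

-- ===== LEMMAS AND PROOFS =====

-- name=value / name=PWN rebuilt from one parameter (the computation both programs share)
def pvBase (p : String) : String :=
  let nv := pvSplit p "="
  PySem.List.pyGetD nv 0 "" ++ "=" ++
    (if PySem.List.len nv > 1 then PySem.List.pyGetD nv 1 "" else "")

def pvPwn (p : String) : String := PySem.List.pyGetD (pvSplit p "=") 0 "" ++ "=PWN"

theorem pv_join_cons (sep x : String) (ys : List String) (h : ys ≠ []) :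
    PySem.Str.join sep (x :: ys) = x ++ sep ++ PySem.Str.join sep ys := by
  cases ys with
  | nil => exact absurd rfl h
  | cons y t =>
    apply String.toList_injective
    simp [PySem.Str.join, PySem.Chars.join_cons_cons]

theorem pv_join_singleton (sep x : String) :
    PySem.Str.join sep [x] = x := by
  apply String.toList_injective
  simp [PySem.Str.join, PySem.Chars.join_singleton]

-- all indices produced by `enumerate xs s` are ≥ s, so an `if idx == i` with i < s never fires
theorem pv_enum_if_all_ne {α β : Type} (f g : α → β) :
    ∀ (xs : List α) (s i : Int), i < s →
      (PySem.List.enumerate xs s).map (fun q => if q.1 == i then f q.2 else g q.2)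
        = xs.map g := by
  intro xs
  induction xs with
  | nil => intro s i _; rfl
  | cons x t ih =>
    intro s i hi
    simp only [PySem.List.enumerate, List.map_cons]
    rw [if_neg (by simp; omega), ih (s + 1) i (by omega)]

-- A's inner pass over `enumerate` with the idx == i test equals take/replace/drop at position k
theorem pv_enum_if_split {α β : Type} (f g : α → β) :
    ∀ (xs : List α) (s : Int) (k : Nat) (h : k < xs.length),
      (PySem.List.enumerate xs s).map (fun q => if q.1 == s + (k : Int) then f q.2 else g q.2)
        = (xs.map g).take k ++ [f (xs[k])] ++ (xs.map g).drop (k + 1) := by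
  intro xs
  induction xs with
  | nil => intro s k h; simp at h
  | cons x t ih =>
    intro s k h
    cases k with
    | zero =>
      simp only [PySem.List.enumerate, List.map_cons, List.take_zero, List.drop_succ_cons,
        List.drop_zero, List.nil_append, List.getElem_cons_zero, Nat.cast_zero, add_zero]
      rw [if_pos (by simp), pv_enum_if_all_ne f g t (s + 1) s (by omega)]
      rfl
    | succ k' =>
      have hk' : k' < t.length := by simpa using h
      simp only [PySem.List.enumerate, List.map_cons, List.take_succ_cons,
        List.drop_succ_cons, List.getElem_cons_succ, List.cons_append]
      rw [if_neg (by simp; omega),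
        show s + ((k' + 1 : Nat) : Int) = s + 1 + (k' : Int) by push_cast; ring,
        ih (s + 1) k' hk']

-- characterisation of A (on a non-empty input): the k-th variant is take/replace/drop at k
theorem parseFormDataLine_char (postData : String) (h : postData ≠ "") :
    parseFormDataLine postData
      = (List.range (pvSplit postData "&").length).map (fun k =>
          PySem.Str.join "&"
            (((pvSplit postData "&").map pvBase).take k
              ++ [pvPwn ((pvSplit postData "&").getD k "")]
              ++ ((pvSplit postData "&").map pvBase).drop (k + 1))) := by
  unfold parseFormDataLine
  rw [if_neg (by simpa using h)]
  set xs := pvSplit postData "&" with hxs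
  rw [PySem.List.foldl_append_singleton_eq_map]
  simp only [List.nil_append, PySem.List.len_eq, PySem.List.pyRange_zero_natCast, List.map_map]
  apply List.map_congr_left
  intro k hk
  have hk' : k < xs.length := by simpa using hk
  simp only [Function.comp_apply]
  rw [PySem.List.foldl_append_singleton_eq_map]
  simp only [List.nil_append]
  congr 1
  have hmap : (List.map (fun (q : Int × String) =>
        PySem.List.pyGetD (pvSplit q.2 "=") 0 "" ++ "=" ++
          (if q.1 == (k : Int) then "PWN"
           else if ((pvSplit q.2 "=").length : Int) > 1 then PySem.List.pyGetD (pvSplit q.2 "=") 1 "" else ""))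
      (PySem.List.enumerate xs))
      = List.map (fun q => if q.1 == (0 : Int) + (k : Int) then pvPwn q.2 else pvBase q.2)
          (PySem.List.enumerate xs) := by
    apply List.map_congr_left
    intro q _
    simp only [zero_add, pvPwn, pvBase, PySem.List.len_eq]
    split
    · rw [String.append_assoc]
      congr 1
    · rfl
  refine hmap.trans ((pv_enum_if_split pvPwn pvBase xs 0 k hk').trans ?_)
  rw [List.getD_eq_getElem _ _ hk']

-- unfolding equations of pvGo in terms of pvBase / pvPwn
theorem pvGo_single (p : String) : pvGo [p] = (pvBase p, [pvPwn p]) := rfl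

theorem pvGo_cons_cons (p q : String) (t : List String) :
    pvGo (p :: q :: t)
      = (pvBase p ++ "&" ++ (pvGo (q :: t)).1,
         (pvPwn p ++ "&" ++ (pvGo (q :: t)).1)
           :: (pvGo (q :: t)).2.map (fun v => pvBase p ++ "&" ++ v)) := rfl

-- characterisation of B's recursion: fst is the rebuilt suffix, snd the variant list
theorem pvGo_fst : ∀ (p : String) (t : List String),
    (pvGo (p :: t)).1 = PySem.Str.join "&" ((p :: t).map pvBase) := by
  intro p t
  induction t generalizing p with
  | nil => rw [pvGo_single, List.map_cons, List.map_nil, pv_join_singleton]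
  | cons q t' ih =>
    rw [pvGo_cons_cons, ih q]
    simp only [List.map_cons]
    rw [pv_join_cons "&" (pvBase p) _ (by simp)]

theorem pvGo_snd : ∀ (xs : List String),
    (pvGo xs).2 = (List.range xs.length).map (fun k =>
      PySem.Str.join "&"
        ((xs.map pvBase).take k ++ [pvPwn (xs.getD k "")] ++ (xs.map pvBase).drop (k + 1))) := by
  intro xs
  induction xs with
  | nil => rfl
  | cons p t ih =>
    cases t with
    | nil =>
      rw [pvGo_single]
      simp [pv_join_singleton, List.range_succ]
    | cons q t' =>
      rw [pvGo_cons_cons p q t', ih, pvGo_fst q t']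
      have hlen : (p :: q :: t').length = (q :: t').length + 1 := rfl
      rw [hlen, List.range_succ_eq_map, List.map_cons, List.map_map]
      refine List.cons_eq_cons.mpr ⟨?_, ?_⟩
      · simp only [List.map_cons, List.take_zero, List.getD_cons_zero, List.nil_append,
          List.singleton_append, List.drop_succ_cons, List.drop_zero]
        rw [pv_join_cons "&" (pvPwn p) _ (by simp)]
      · rw [List.map_map]
        apply List.map_congr_left
        intro j _
        simp only [Function.comp_apply, Nat.succ_eq_add_one, List.map_cons, List.take_succ_cons,
          List.getD_cons_succ, List.drop_succ_cons, List.cons_append]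
        rw [pv_join_cons "&" (pvBase p) _ (by simp)]

-- ===== VERDICT (by name: the statement is the Claim_ definition above) =====
theorem parseFormDataLine_spec : Claim_equal_parseFormDataLine := by
  intro postData _ hpre
  show parseFormDataLine postData = parseFormDataLine_alt postData
  unfold parseFormDataLine_alt
  rw [if_neg (by simpa using hpre), pvGo_snd, parseFormDataLine_char postData hpre]
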